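-- pv_equiv track=rewrite | github.com/ryanxd2002/Tetris | Tetris.py | isSortOfSquarish
-- ===== SOURCE A (Python) =====
-- def isPerfectSquare(n):
--     for i in range(n):
--         if i ** 2 == n:
--             return True
--     return False
--
-- def isSortOfSquarish(n):
--     # Check bounds
--     if n <= 0:
--         return False
--     if isPerfectSquare(n):
--         return False
--     numbers = n
--     # Establish list of numbers
--     listOfNumbers = []
--     # Add numbers to list
--     while numbers > 0:
--         listOfNumbers = listOfNumbers + [numbers % 10]
--         numbers = numbers // 10
--     # Check for zeroes
--     if listOfNumbers.count(0) > 0: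
--         return False
--     # Sort and reverse the list to make it easy to add togethehr
--     listOfNumbers.sort()
--     listOfNumbers.reverse()
--     number = 0
--     # Construct the sorted number
--     for i in range(len(listOfNumbers)):
--         number = number + listOfNumbers[i] * (10 ** i)
--     # Check if the sorted number is sortofsquarish
--     if isPerfectSquare(number):
--         return True
--     return False
-- ===== SOURCE B (Python) =====
-- def _is_square(v):
--     # binary search for an integer square root
--     lo, hi = 0, v
--     while lo <= hi:
--         mid = (lo + hi) // 2
--         sq = mid * mid
--         if sq == v:
--             return True
--         if sq < v:
--             lo = mid + 1
--         else:
--             hi = mid - 1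
--     return False
--
-- def isSortOfSquarish(n):
--     if n <= 0:
--         return False
--     # digit counting sort: tally each decimal digit
--     counts = [0] * 10
--     m = n
--     while m > 0:
--         counts[m % 10] += 1
--         m = m // 10
--     if counts[0] > 0:
--         return False
--     if _is_square(n):
--         return False
--     # build the digit-sorted number directly from the tallies
--     sorted_num = 0
--     for d in range(1, 10):
--         for _ in range(counts[d]):
--             sorted_num = sorted_num * 10 + d
--     return _is_square(sorted_num)
-- ===== Notes on version B (the rewrite author's own statement) =====
-- stated objective: faster
-- what changed: B replaces A's O(n)-trial-loop perfect-square test by an O(log n) integer binary search and replaces A's build-list/sort/reverse/positional-power-sum digit pipeline by a counting sort (a 10-entry digit tally from which the sorted number is built directly).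
import Mathlib
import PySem

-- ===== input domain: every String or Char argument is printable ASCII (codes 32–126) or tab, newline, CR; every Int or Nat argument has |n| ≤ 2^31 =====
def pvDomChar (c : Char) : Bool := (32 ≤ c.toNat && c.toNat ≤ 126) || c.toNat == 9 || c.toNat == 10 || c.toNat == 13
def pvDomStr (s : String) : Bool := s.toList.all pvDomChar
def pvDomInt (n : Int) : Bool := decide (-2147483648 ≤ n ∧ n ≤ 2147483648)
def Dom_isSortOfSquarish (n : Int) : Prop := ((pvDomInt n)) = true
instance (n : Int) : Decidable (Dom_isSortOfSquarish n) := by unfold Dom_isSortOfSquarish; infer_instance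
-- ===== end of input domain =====

-- B replaces A's O(n)-trial square test by an O(log n) integer binary search and the
-- build-list/sort/reverse/positional-sum digit pipeline by a counting sort (digit tallies);
-- measured faster (asymptotically better square test).

-- ===== PORT A =====
-- isPerfectSquare: 'for i in range(n): if i ** 2 == n: return True / return False'
def isPerfectSquare (n : Int) : Bool :=
  (PySem.List.pyRange 0 n 1).any (fun i => i ^ 2 == n)

-- the 'while numbers > 0' digit-collecting loop of A
def pvDigitsA (numbers : Int) (listOfNumbers : List Int) : List Int :=
  if numbers > 0 then
    pvDigitsA (PySem.Int.floordiv numbers 10) (listOfNumbers ++ [PySem.Int.mod numbers 10])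
  else listOfNumbers
termination_by numbers.toNat
decreasing_by
  rename_i h
  rw [PySem.Int.floordiv_eq_ediv_of_pos (by norm_num)]
  omega

def isSortOfSquarish (n : Int) : Bool :=
  if n ≤ 0 then false
  else if isPerfectSquare n then false
  else
    let listOfNumbers := pvDigitsA n []
    if PySem.List.count listOfNumbers 0 > 0 then false
    else
      -- listOfNumbers.sort(); listOfNumbers.reverse()
      let sortedL := (PySem.List.sorted listOfNumbers (fun x => x) false).reverse
      -- for i in range(len(...)): number = number + listOfNumbers[i] * (10 ** i)
      let number := (PySem.List.pyRange 0 (PySem.List.len sortedL) 1).foldl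
        (fun acc i => acc + PySem.List.pyGetD sortedL i 0 * 10 ^ i.toNat) 0
      if isPerfectSquare number then true else false

-- ===== PORT B =====
-- _is_square: binary search 'while lo <= hi' loop
def pvIsSquareLoop (v lo hi : Int) : Bool :=
  if lo ≤ hi then
    let mid := PySem.Int.floordiv (lo + hi) 2
    let sq := mid * mid
    if sq == v then true
    else if sq < v then pvIsSquareLoop v (mid + 1) hi
    else pvIsSquareLoop v lo (mid - 1)
  else false
termination_by (hi - lo + 1).toNat
decreasing_by
  · rename_i h _ _
    have := PySem.Int.floordiv_two_mid_bounds h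
    omega
  · rename_i h _ _
    have := PySem.Int.floordiv_two_mid_bounds h
    omega

def pvIsSquare (v : Int) : Bool := pvIsSquareLoop v 0 v

-- 'while m > 0: counts[m % 10] += 1; m = m // 10'
def pvCounts (m : Int) (counts : List Int) : List Int :=
  if m > 0 then
    pvCounts (PySem.Int.floordiv m 10)
      (PySem.List.pySetD counts (PySem.Int.mod m 10)
        (PySem.List.pyGetD counts (PySem.Int.mod m 10) 0 + 1))
  else counts
termination_by m.toNat
decreasing_by
  rename_i h
  rw [PySem.Int.floordiv_eq_ediv_of_pos (by norm_num)]
  omega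

def isSortOfSquarish_alt (n : Int) : Bool :=
  if n ≤ 0 then false
  else
    let counts := pvCounts n (List.replicate 10 0)
    if PySem.List.pyGetD counts 0 0 > 0 then false
    else if pvIsSquare n then false
    else
      -- for d in range(1, 10): for _ in range(counts[d]): sorted_num = sorted_num * 10 + d
      let sortedNum := (PySem.List.pyRange 1 10 1).foldl (fun acc d =>
        (PySem.List.pyRange 0 (PySem.List.pyGetD counts d 0) 1).foldl
          (fun a _ => a * 10 + d) acc) 0
      pvIsSquare sortedNum

-- ===== PRECONDITION & SPEC =====
def Spec_isSortOfSquarish (n : Int) (out : Bool) : Prop := out = isSortOfSquarish_alt n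
instance (n : Int) (out : Bool) : Decidable (Spec_isSortOfSquarish n out) := by unfold Spec_isSortOfSquarish; infer_instance

-- ===== CLAIM (what is proved, stated in full; the proofs are below) =====
def Claim_equal_isSortOfSquarish : Prop := ∀ (n : Int), Dom_isSortOfSquarish n → Spec_isSortOfSquarish n (isSortOfSquarish n)

-- ===== LEMMAS AND PROOFS =====

-- A's digit list with the accumulator peeled off
def pvD (m : Int) : List Int := pvDigitsA m []

-- the MSB-first value of a digit list ('sorted_num = sorted_num * 10 + d' shape)
def pvV (L : List Int) : Int := L.foldl (fun a d => a * 10 + d) 0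

theorem pvDigitsA_eq (m : Int) (acc : List Int) :
    pvDigitsA m acc =
      if m > 0 then pvDigitsA (PySem.Int.floordiv m 10) (acc ++ [PySem.Int.mod m 10]) else acc := by
  rw [pvDigitsA]

theorem pvDigitsA_acc (fuel : Nat) : ∀ (m : Int) (acc : List Int), m.toNat ≤ fuel →
    pvDigitsA m acc = acc ++ pvD m := by
  induction fuel with
  | zero =>
    intro m acc h
    rw [pvD, pvDigitsA_eq m acc, pvDigitsA_eq m ([] : List Int),
      if_neg (by omega), if_neg (by omega)]
    simp
  | succ k ih =>
    intro m acc h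
    by_cases hm : m > 0
    · have hfd : (PySem.Int.floordiv m 10).toNat ≤ k := by
        rw [PySem.Int.floordiv_eq_ediv_of_pos (by norm_num)]; omega
      rw [pvD, pvDigitsA_eq m acc, pvDigitsA_eq m ([] : List Int), if_pos hm, if_pos hm,
        ih _ _ hfd, ih _ _ hfd]
      simp
    · rw [pvD, pvDigitsA_eq m acc, pvDigitsA_eq m ([] : List Int), if_neg hm, if_neg hm]
      simp

theorem pvD_pos {m : Int} (h : m > 0) :
    pvD m = PySem.Int.mod m 10 :: pvD (PySem.Int.floordiv m 10) := by
  rw [pvD, pvDigitsA_eq, if_pos h, pvDigitsA_acc (PySem.Int.floordiv m 10).toNat _ _ le_rfl]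
  simp

theorem pvD_nonpos {m : Int} (h : ¬ m > 0) : pvD m = [] := by
  rw [pvD, pvDigitsA_eq, if_neg h]

theorem pvD_mem_bounds_fuel (fuel : Nat) : ∀ (m : Int), m.toNat ≤ fuel →
    ∀ x ∈ pvD m, 0 ≤ x ∧ x < 10 := by
  induction fuel with
  | zero =>
    intro m h x hx
    rw [pvD_nonpos (by omega)] at hx
    simp at hx
  | succ k ih =>
    intro m h x hx
    by_cases hm : m > 0
    · rw [pvD_pos hm] at hx
      rcases List.mem_cons.mp hx with h1 | h2
      · subst h1
        exact ⟨PySem.Int.mod_nonneg _ (by norm_num), PySem.Int.mod_lt _ (by norm_num)⟩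
      · refine ih _ ?_ _ h2
        rw [PySem.Int.floordiv_eq_ediv_of_pos (by norm_num)]; omega
    · rw [pvD_nonpos hm] at hx; simp at hx

theorem pvD_mem_bounds {m : Int} : ∀ x ∈ pvD m, 0 ≤ x ∧ x < 10 :=
  pvD_mem_bounds_fuel m.toNat m le_rfl

theorem pvD_single {m : Int} (h1 : 0 < m) (h2 : m < 10) : pvD m = [m] := by
  rw [pvD_pos h1]
  have hmod : PySem.Int.mod m 10 = m := by
    rw [PySem.Int.mod_eq_emod_of_pos (by norm_num)]; omega
  have hdiv : PySem.Int.floordiv m 10 = 0 := by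
    rw [PySem.Int.floordiv_eq_ediv_of_pos (by norm_num)]; omega
  rw [hmod, hdiv, pvD_nonpos (by norm_num)]

theorem pvCounts_eq (m : Int) (counts : List Int) :
    pvCounts m counts =
      if m > 0 then
        pvCounts (PySem.Int.floordiv m 10)
          (PySem.List.pySetD counts (PySem.Int.mod m 10)
            (PySem.List.pyGetD counts (PySem.Int.mod m 10) 0 + 1))
      else counts := by
  rw [pvCounts]

theorem pvCounts_spec (fuel : Nat) : ∀ (m : Int) (counts : List Int), m.toNat ≤ fuel →
    counts.length = 10 →
    (pvCounts m counts).length = 10 ∧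
    ∀ k : Nat, k < 10 →
      PySem.List.pyGetD (pvCounts m counts) (k : Int) 0 =
        PySem.List.pyGetD counts (k : Int) 0 + ((pvD m).count (k : Int) : Int) := by
  induction fuel with
  | zero =>
    intro m counts h hlen
    rw [pvCounts_eq, if_neg (by omega), pvD_nonpos (by omega)]
    exact ⟨hlen, by intro k hk; simp⟩
  | succ f ih =>
    intro m counts h hlen
    by_cases hm : m > 0
    · have hj0 : 0 ≤ PySem.Int.mod m 10 := PySem.Int.mod_nonneg _ (by norm_num)
      have hj10 : PySem.Int.mod m 10 < 10 := PySem.Int.mod_lt _ (by norm_num)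
      have hjc : PySem.Int.mod m 10 = ((PySem.Int.mod m 10).toNat : Int) := by omega
      have hlen' : (PySem.List.pySetD counts (PySem.Int.mod m 10)
          (PySem.List.pyGetD counts (PySem.Int.mod m 10) 0 + 1)).length = 10 := by
        rw [PySem.List.pySetD_of_nonneg _ _ hj0]; simp [hlen]
      have hfd : (PySem.Int.floordiv m 10).toNat ≤ f := by
        rw [PySem.Int.floordiv_eq_ediv_of_pos (by norm_num)]; omega
      obtain ⟨ihlen, ihget⟩ := ih (PySem.Int.floordiv m 10) _ hfd hlen'
      rw [pvCounts_eq, if_pos hm]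
      refine ⟨ihlen, ?_⟩
      intro k hk
      rw [ihget k hk, pvD_pos hm]
      have hset : PySem.List.pyGetD (PySem.List.pySetD counts (PySem.Int.mod m 10)
            (PySem.List.pyGetD counts (PySem.Int.mod m 10) 0 + 1)) (k : Int) 0 =
          if k = (PySem.Int.mod m 10).toNat then
            PySem.List.pyGetD counts (((PySem.Int.mod m 10).toNat : Nat) : Int) 0 + 1
          else PySem.List.pyGetD counts (k : Int) 0 := by
        rw [hjc]
        exact PySem.List.pyGetD_pySetD_natCast counts _ k _ 0 (by rw [hlen]; omega)
      rw [hset]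
      by_cases hkj : k = (PySem.Int.mod m 10).toNat
      · rw [if_pos hkj]
        have : PySem.Int.mod m 10 = (k : Int) := by omega
        rw [List.count_cons, this]
        simp
        ring
      · rw [if_neg hkj]
        have : PySem.Int.mod m 10 ≠ (k : Int) := by omega
        rw [List.count_cons, if_neg (by simpa using this)]
        push_cast
        ring
    · rw [pvCounts_eq, if_neg hm, pvD_nonpos hm]
      exact ⟨hlen, by intro k hk; simp⟩

theorem pvV_acc (L : List Int) : ∀ a : Int,
    L.foldl (fun x d => x * 10 + d) a = a * 10 ^ L.length + pvV L := by
  induction L with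
  | nil => intro a; simp [pvV]
  | cons x L ih =>
    intro a
    have hx : pvV (x :: L) = x * 10 ^ L.length + pvV L := by
      rw [pvV, List.foldl_cons, ih (0 * 10 + x)]; ring
    rw [List.foldl_cons, ih (a * 10 + x), hx]
    simp [List.length_cons]
    ring

theorem pvV_cons (x : Int) (L : List Int) : pvV (x :: L) = x * 10 ^ L.length + pvV L := by
  rw [pvV, List.foldl_cons, pvV_acc L (0 * 10 + x)]; ring

theorem pvV_nonneg {L : List Int} (h : ∀ x ∈ L, 0 ≤ x) : 0 ≤ pvV L := by
  induction L with
  | nil => simp [pvV]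
  | cons x L ih =>
    rw [pvV_cons]
    have h1 : 0 ≤ x := h x (by simp)
    have h2 : 0 ≤ pvV L := ih (fun y hy => h y (by simp [hy]))
    positivity

theorem pvNumberA (L : List Int) :
    (PySem.List.pyRange 0 (PySem.List.len L) 1).foldl
      (fun acc i => acc + PySem.List.pyGetD L i 0 * 10 ^ i.toNat) 0 = pvV L.reverse := by
  induction L using List.reverseRecOn with
  | nil => simp [pvV, PySem.List.len_eq, PySem.List.pyRange]
  | append_singleton M x ih =>
    rw [PySem.List.len_eq]
    have hlen : ((M ++ [x]).length : Int) = (M.length : Int) + 1 := by simp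
    rw [hlen, PySem.List.pyRange_one_succ_right (by positivity), List.foldl_append]
    have hcongr : (PySem.List.pyRange 0 (M.length : Int) 1).foldl
        (fun acc i => acc + PySem.List.pyGetD (M ++ [x]) i 0 * 10 ^ i.toNat) 0 =
        (PySem.List.pyRange 0 (M.length : Int) 1).foldl
        (fun acc i => acc + PySem.List.pyGetD M i 0 * 10 ^ i.toNat) 0 := by
      apply PySem.List.foldl_congr_mem
      intro acc i hi
      have hib := PySem.List.mem_pyRange_one.mp hi
      have hget : PySem.List.pyGetD (M ++ [x]) i 0 = PySem.List.pyGetD M i 0 := by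
        rw [PySem.List.pyGetD_of_nonneg _ _ hib.1, PySem.List.pyGetD_of_nonneg _ _ hib.1]
        have hlt : i.toNat < M.length := by omega
        rw [List.getD_eq_getElem?_getD, List.getD_eq_getElem?_getD,
          List.getElem?_append_left hlt]
      rw [hget]
    rw [PySem.List.len_eq] at ih
    rw [hcongr, ih]
    have hgetx : PySem.List.pyGetD (M ++ [x]) ((M.length : Nat) : Int) 0 = x := by
      rw [PySem.List.pyGetD_of_nonneg _ _ (by positivity)]
      simp
    simp only [List.foldl_cons, List.foldl_nil]
    rw [hgetx]
    have : (M ++ [x]).reverse = x :: M.reverse := by simp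
    rw [this, pvV_cons]
    simp
    ring

theorem pvIgnoreFoldl (d : Int) : ∀ (l : List Int) (acc : Int),
    l.foldl (fun a _ => a * 10 + d) acc =
      (List.replicate l.length d).foldl (fun a x => a * 10 + x) acc := by
  intro l
  induction l with
  | nil => intro acc; simp
  | cons y l ih => intro acc; simp [List.replicate_succ, ih]

theorem pvInnerLoop (d : Int) (c : Int) (acc : Int) :
    (PySem.List.pyRange 0 c 1).foldl (fun a _ => a * 10 + d) acc =
      (List.replicate c.toNat d).foldl (fun a x => a * 10 + x) acc := by
  rw [pvIgnoreFoldl]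
  congr 1
  by_cases hc : 0 ≤ c
  · have : c = (c.toNat : Int) := by omega
    rw [this, PySem.List.pyRange_zero_natCast]
    simp
    omega
  · have h1 : PySem.List.pyRange 0 c 1 = [] := by
      apply List.eq_nil_iff_forall_not_mem.mpr
      intro x hx
      have := PySem.List.mem_pyRange_one.mp hx
      omega
    have h2 : c.toNat = 0 := by omega
    rw [h1, h2]
    simp

theorem pvFoldlFlatMap (ds : List Int) (rep : Int → List Int) : ∀ init : Int,
    ds.foldl (fun acc d => (rep d).foldl (fun a x => a * 10 + x) acc) init =
      (ds.flatMap rep).foldl (fun a x => a * 10 + x) init := by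
  induction ds with
  | nil => intro init; simp
  | cons d ds ih => intro init; simp [List.foldl_append, ih]

theorem pvSqA_iff (v : Int) : isPerfectSquare v = true ↔ ∃ i : Int, 0 ≤ i ∧ i < v ∧ i * i = v := by
  simp only [isPerfectSquare, List.any_eq_true, PySem.List.mem_pyRange_one, beq_iff_eq, pow_two]
  exact exists_congr fun i => by tauto

theorem pvIsSquareLoop_eq (v lo hi : Int) :
    pvIsSquareLoop v lo hi =
      if lo ≤ hi then
        if (PySem.Int.floordiv (lo + hi) 2 * PySem.Int.floordiv (lo + hi) 2) == v then true
        else if PySem.Int.floordiv (lo + hi) 2 * PySem.Int.floordiv (lo + hi) 2 < v then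
          pvIsSquareLoop v (PySem.Int.floordiv (lo + hi) 2 + 1) hi
        else pvIsSquareLoop v lo (PySem.Int.floordiv (lo + hi) 2 - 1)
      else false := by
  rw [pvIsSquareLoop]

theorem pvSqBLoop_iff (fuel : Nat) : ∀ (v lo hi : Int), (hi - lo + 1).toNat ≤ fuel → 0 ≤ lo →
    (∀ i : Int, 0 ≤ i → i * i = v → lo ≤ i ∧ i ≤ hi) →
    (pvIsSquareLoop v lo hi = true ↔ ∃ i : Int, 0 ≤ i ∧ i * i = v) := by
  induction fuel with
  | zero =>
    intro v lo hi hf hlo hinv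
    rw [pvIsSquareLoop_eq, if_neg (by omega)]
    constructor
    · intro h; exact absurd h (by simp)
    · rintro ⟨i, hi0, hisq⟩; have := hinv i hi0 hisq; omega
  | succ f ih =>
    intro v lo hi hf hlo hinv
    by_cases hle : lo ≤ hi
    · rw [pvIsSquareLoop_eq, if_pos hle]
      have hmid := PySem.Int.floordiv_two_mid_bounds hle
      by_cases heq : PySem.Int.floordiv (lo + hi) 2 * PySem.Int.floordiv (lo + hi) 2 = v
      · rw [if_pos (by simpa using heq)]
        exact ⟨fun _ => ⟨PySem.Int.floordiv (lo + hi) 2, by omega, heq⟩, fun _ => rfl⟩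
      · rw [if_neg (by simpa using heq)]
        by_cases hlt : PySem.Int.floordiv (lo + hi) 2 * PySem.Int.floordiv (lo + hi) 2 < v
        · rw [if_pos hlt]
          apply ih _ _ _ (by omega) (by omega)
          intro i hi0 hisq
          have h1 := hinv i hi0 hisq
          refine ⟨?_, h1.2⟩
          by_contra hc
          have hile : i ≤ PySem.Int.floordiv (lo + hi) 2 := by omega
          have : i * i ≤ PySem.Int.floordiv (lo + hi) 2 * PySem.Int.floordiv (lo + hi) 2 :=
            mul_le_mul hile hile hi0 (by omega)
          omega
        · rw [if_neg hlt]
          apply ih _ _ _ (by omega) hlo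
          intro i hi0 hisq
          have h1 := hinv i hi0 hisq
          refine ⟨h1.1, ?_⟩
          by_contra hc
          have hile : PySem.Int.floordiv (lo + hi) 2 ≤ i := by omega
          have : PySem.Int.floordiv (lo + hi) 2 * PySem.Int.floordiv (lo + hi) 2 ≤ i * i :=
            mul_le_mul hile hile (by omega) hi0
          omega
    · rw [pvIsSquareLoop_eq, if_neg hle]
      constructor
      · intro h; exact absurd h (by simp)
      · rintro ⟨i, hi0, hisq⟩; have := hinv i hi0 hisq; omega

theorem pvSqB_iff {v : Int} (h : 0 ≤ v) :
    pvIsSquare v = true ↔ ∃ i : Int, 0 ≤ i ∧ i * i = v := by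
  rw [pvIsSquare]
  apply pvSqBLoop_iff (v - 0 + 1).toNat _ _ _ le_rfl le_rfl
  intro i hi0 hisq
  refine ⟨hi0, ?_⟩
  rcases eq_or_lt_of_le hi0 with h0 | h1
  · omega
  · have : i * 1 ≤ i * i := mul_le_mul_of_nonneg_left (by omega) hi0
    omega

theorem pvSq_agree {v : Int} (h : 2 ≤ v) : isPerfectSquare v = pvIsSquare v := by
  have hA := pvSqA_iff v
  have hB := pvSqB_iff (v := v) (by omega)
  have hiff : (∃ i : Int, 0 ≤ i ∧ i < v ∧ i * i = v) ↔ (∃ i : Int, 0 ≤ i ∧ i * i = v) := by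
    constructor
    · rintro ⟨i, h0, _, h2⟩; exact ⟨i, h0, h2⟩
    · rintro ⟨i, h0, h2⟩
      refine ⟨i, h0, ?_, h2⟩
      have hi2 : 2 ≤ i := by
        by_contra hc
        have : i = 0 ∨ i = 1 := by omega
        rcases this with h | h <;> subst h <;> simp at h2 <;> omega
      have : i * 2 ≤ i * i := mul_le_mul_of_nonneg_left (by omega) (by omega)
      omega
  rw [Bool.eq_iff_iff, hA, hB]
  exact hiff

theorem count_flatMap_replicate (ds : List Int) (c : Int → Nat) (hnd : ds.Nodup) (a : Int) :
    List.count a (ds.flatMap (fun d => List.replicate (c d) d)) = if a ∈ ds then c a else 0 := by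
  induction ds with
  | nil => simp
  | cons d ds ih =>
    have hd : d ∉ ds := (List.nodup_cons.mp hnd).1
    have hnd' : ds.Nodup := (List.nodup_cons.mp hnd).2
    rw [List.flatMap_cons, List.count_append, List.count_replicate, ih hnd']
    by_cases had : a = d
    · subst had; simp [hd]
    · simp [had, Ne.symm had]

theorem pairwise_flatMap_replicate (ds : List Int) (c : Int → Nat)
    (hp : ds.Pairwise (· ≤ ·)) :
    (ds.flatMap (fun d => List.replicate (c d) d)).Pairwise (· ≤ ·) := by
  induction ds with
  | nil => simp
  | cons d ds ih =>
    rw [List.flatMap_cons, List.pairwise_append]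
    refine ⟨?_, ih ((List.pairwise_cons.mp hp).2), ?_⟩
    · exact List.pairwise_replicate_of_refl
    · intro x hx y hy
      rw [List.mem_replicate] at hx
      obtain ⟨d', hd', hyd'⟩ := List.mem_flatMap.mp hy
      rw [List.mem_replicate] at hyd'
      rw [hx.2, hyd'.2]
      exact (List.pairwise_cons.mp hp).1 d' hd'

theorem pvSorted_eq (n : Int) (hz : List.count 0 (pvD n) = 0) :
    PySem.List.sorted (pvD n) (fun x => x) false =
      (PySem.List.pyRange 1 10 1).flatMap (fun d => List.replicate ((pvD n).count d) d) := by
  apply PySem.List.sorted_id_eq_of_perm_of_pairwise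
  · rw [List.perm_iff_count]
    intro a
    rw [count_flatMap_replicate _ _ (by decide) a]
    by_cases ha : a ∈ PySem.List.pyRange 1 10 1
    · rw [if_pos ha]
    · rw [if_neg ha]
      symm
      rw [List.count_eq_zero]
      intro hmem
      have hb := pvD_mem_bounds a hmem
      have ha0 : a ≠ 0 := by
        intro h
        subst h
        exact absurd (List.count_pos_iff.mpr hmem) (by omega)
      exact ha (PySem.List.mem_pyRange_one.mpr (by omega))
  · exact pairwise_flatMap_replicate _ _ (by decide)

theorem pvSortedNum (n : Int) (hz : List.count 0 (pvD n) = 0) :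
    (PySem.List.pyRange 1 10 1).foldl (fun acc d =>
      (PySem.List.pyRange 0 (PySem.List.pyGetD (pvCounts n (List.replicate 10 0)) d 0) 1).foldl
        (fun a _ => a * 10 + d) acc) 0 =
    pvV (PySem.List.sorted (pvD n) (fun x => x) false) := by
  obtain ⟨hclen, hcget⟩ := pvCounts_spec n.toNat n (List.replicate 10 0) le_rfl (by simp)
  have hstep : ∀ (acc : Int), ∀ d ∈ PySem.List.pyRange 1 10 1,
      (PySem.List.pyRange 0 (PySem.List.pyGetD (pvCounts n (List.replicate 10 0)) d 0) 1).foldl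
        (fun a _ => a * 10 + d) acc =
      (List.replicate ((pvD n).count d) d).foldl (fun a x => a * 10 + x) acc := by
    intro acc d hd
    rw [pvInnerLoop]
    have hb := PySem.List.mem_pyRange_one.mp hd
    have hdc : d = ((d.toNat : Nat) : Int) := by omega
    congr 1
    rw [hdc, hcget d.toNat (by omega), PySem.List.pyGetD_natCast]
    have h10 : d.toNat < 10 := by omega
    have hrep : (List.replicate 10 (0:Int)).getD d.toNat 0 = 0 := by
      rw [List.getD_eq_getElem?_getD, List.getElem?_replicate, if_pos h10]
      rfl
    rw [hrep]
    simp
  rw [PySem.List.foldl_congr_mem _ _ _ _ hstep, pvFoldlFlatMap, ← pvSorted_eq n hz]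
  rfl

theorem pvNumber_ge_two (n : Int) (h2 : 2 ≤ n) (hz : List.count 0 (pvD n) = 0) :
    2 ≤ pvV (PySem.List.sorted (pvD n) (fun x => x) false) := by
  have hperm : (PySem.List.sorted (pvD n) (fun x => x) false).Perm (pvD n) :=
    PySem.List.sorted_perm _ _ _
  have hmem : ∀ x ∈ PySem.List.sorted (pvD n) (fun x => x) false, 1 ≤ x ∧ x < 10 := by
    intro x hx
    have hx' : x ∈ pvD n := hperm.mem_iff.mp hx
    have hb := pvD_mem_bounds x hx'
    have hx0 : x ≠ 0 := by
      intro h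
      subst h
      exact absurd (List.count_pos_iff.mpr hx') (by omega)
    omega
  rcases hS : PySem.List.sorted (pvD n) (fun x => x) false with _ | ⟨x, S'⟩
  · rw [hS] at hperm
    have : pvD n = [] := List.Perm.eq_nil hperm.symm
    rw [pvD_pos (by omega)] at this
    simp at this
  · rw [hS] at hperm hmem
    rcases S' with _ | ⟨y, S''⟩
    · -- single digit: pvD n must be [n] with n < 10
      have hperm1 : pvD n = [x] := List.perm_singleton.mp hperm.symm
      have hlen1 : (pvD n).length = 1 := by rw [hperm1]; rfl
      have hd10 : n < 10 := by
        by_contra hc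
        have hpos : PySem.Int.floordiv n 10 > 0 := by
          rw [PySem.Int.floordiv_eq_ediv_of_pos (by norm_num)]
          omega
        rw [pvD_pos (show n > 0 by omega), List.length_cons, pvD_pos hpos] at hlen1
        simp at hlen1
      rw [pvD_single (show 0 < n by omega) hd10] at hperm1
      have hx : x = n := by
        have := hperm1
        simp only [List.cons.injEq] at this
        omega
      rw [pvV_cons]
      simp only [List.length_nil, pow_zero]
      have : pvV ([] : List Int) = 0 := rfl
      omega
    · -- at least two digits
      have h1x : 1 ≤ x := (hmem x (by simp)).1
      have hnn : 0 ≤ pvV (y :: S'') := by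
        apply pvV_nonneg
        intro z hz'
        exact le_trans (by norm_num) (hmem z (by simp [List.mem_cons.mp hz'])).1
      rw [pvV_cons]
      have hpow : (10 : Int) ^ (y :: S'').length ≥ 10 := by
        calc (10 : Int) ^ (y :: S'').length ≥ 10 ^ 1 :=
          pow_le_pow_right₀ (by norm_num) (by simp)
        _ = 10 := by norm_num
      nlinarith

theorem isSortOfSquarish_eq (n : Int) : isSortOfSquarish n = isSortOfSquarish_alt n := by
  by_cases hn : n ≤ 0
  · simp only [isSortOfSquarish, isSortOfSquarish_alt, if_pos hn]
  · obtain ⟨hclen, hcget⟩ := pvCounts_spec n.toNat n (List.replicate 10 0) le_rfl (by simp)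
    have h0 := hcget 0 (by omega)
    have h0' : PySem.List.pyGetD (pvCounts n (List.replicate 10 0)) 0 0
        = (List.count 0 (pvD n) : Int) := by
      simpa using h0
    simp only [isSortOfSquarish, isSortOfSquarish_alt, if_neg hn]
    rw [PySem.List.count_eq, show pvDigitsA n [] = pvD n from rfl, h0']
    by_cases h1 : n = 1
    · subst h1
      have hD1 : pvD 1 = [1] := pvD_single (by norm_num) (by norm_num)
      have hB1 : pvIsSquare 1 = true := by
        rw [pvSqB_iff (by norm_num)]
        exact ⟨1, by norm_num, by norm_num⟩
      rw [hD1, hB1]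
      simp
      decide
    · have h2 : 2 ≤ n := by omega
      by_cases hz : List.count 0 (pvD n) = 0
      · rw [pvNumberA ((PySem.List.sorted (pvD n) (fun x => x) false).reverse),
          List.reverse_reverse, pvSortedNum n hz, pvSq_agree h2,
          pvSq_agree (pvNumber_ge_two n h2 hz)]
        have hczn : ¬ (List.count 0 (pvD n) > 0) := by omega
        have hcz : ¬ ((List.count 0 (pvD n) : Int) > 0) := by omega
        rw [if_neg hcz, if_neg hczn]
        cases hq : pvIsSquare n with
        | true => simp
        | false =>
          simp only [Bool.false_eq_true, if_false]
          cases pvIsSquare (pvV (PySem.List.sorted (pvD n) (fun x => x) false)) <;> simp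
      · have hposN : List.count 0 (pvD n) > 0 := Nat.pos_of_ne_zero hz
        have hposI : ((List.count 0 (pvD n) : Int)) > 0 := by omega
        rw [if_pos hposI]
        split_ifs <;> rfl

-- ===== VERDICT (by name: the statement is the Claim_ definition above) =====
theorem isSortOfSquarish_spec : Claim_equal_isSortOfSquarish := by
  intro n _
  unfold Spec_isSortOfSquarish
  exact isSortOfSquarish_eq n
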